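-- pv_equiv track=rewrite | github.com/jJup0/LeetCode | Hard/773. Sliding Puzzle.py | _board_to_hash
-- ===== SOURCE A (Python) =====
-- def _board_to_hash(board: list[list[int]]):
--     """Hash of a board's state, guaranteed collision-free.
--     Complexity:
--         Time: O(x)
--         Space: O(1)
--     """
--     multi = 1
--     hash_val = 0
--     for row in board:
--         for val in row:
--             hash_val += val * multi
--             multi *= 6
--     return hash_val
-- ===== SOURCE B (Python) =====
-- def _board_to_hash(board: list[list[int]]):
--     """Hash of a board's state: flatten the grid to one cell list, then
--     evaluate it as a base-6 Horner polynomial over the reversed cells."""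
--     cells = [v for row in board for v in row]
--     h = 0
--     for v in reversed(cells):
--         h = h * 6 + v
--     return h
-- ===== Notes on version B (the rewrite author's own statement) =====
-- stated objective: alternative
-- what changed: Replaced the stateful nested loop carrying a running power-of-6 multiplier by a two-stage decomposition: flatten the grid to one cell list, then a single Horner pass h = h*6 + v over the reversed cells (no multiplier variable, no nested loop).
import Mathlib
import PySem

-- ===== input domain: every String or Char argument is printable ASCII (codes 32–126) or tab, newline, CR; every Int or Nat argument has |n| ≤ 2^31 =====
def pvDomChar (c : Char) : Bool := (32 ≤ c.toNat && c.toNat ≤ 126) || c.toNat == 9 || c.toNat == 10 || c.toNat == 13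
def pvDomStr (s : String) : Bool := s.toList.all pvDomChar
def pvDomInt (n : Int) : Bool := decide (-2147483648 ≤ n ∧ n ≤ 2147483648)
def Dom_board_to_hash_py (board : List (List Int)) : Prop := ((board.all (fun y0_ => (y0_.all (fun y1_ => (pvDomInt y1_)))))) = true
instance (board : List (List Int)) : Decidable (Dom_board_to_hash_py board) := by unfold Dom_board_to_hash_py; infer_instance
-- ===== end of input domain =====

-- B trades A's stateful nested loop (running power-of-6 multiplier) for a flatten
-- step plus a recursive base-6 Horner evaluation (objective: alternative, same cost).

-- ===== PORT A =====
-- state (multi, hash_val); per cell: hash_val += val*multi; multi *= 6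
def board_to_hash_py (board : List (List Int)) : Int :=
  (board.foldl
    (fun s row => row.foldl (fun (s : Int × Int) val => (s.1 * 6, s.2 + val * s.1)) s)
    (1, 0)).2

-- ===== PORT B =====
-- cells = [v for row in board for v in row]
-- h = 0; for v in reversed(cells): h = h*6 + v
def board_to_hash_py_alt (board : List (List Int)) : Int :=
  (board.flatMap (fun row => row)).reverse.foldl (fun h v => h * 6 + v) 0

-- ===== PRECONDITION & SPEC =====
def Spec_board_to_hash_py (board : List (List Int)) (out : Int) : Prop := out = board_to_hash_py_alt board
instance (board : List (List Int)) (out : Int) : Decidable (Spec_board_to_hash_py board out) := by unfold Spec_board_to_hash_py; infer_instance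

-- ===== CLAIM (what is proved, stated in full; the proofs are below) =====
def Claim_equal_board_to_hash_py : Prop := ∀ (board : List (List Int)), Dom_board_to_hash_py board → Spec_board_to_hash_py board (board_to_hash_py board)

-- ===== LEMMAS AND PROOFS =====

-- proof-side reference: foldr Horner value of a flat cell list
def pvHornerRec : List Int → Int
  | [] => 0
  | v :: t => v + 6 * pvHornerRec t

theorem b_fold (l : List Int) (h : Int) :
    l.reverse.foldl (fun h v => h * 6 + v) h = h * 6 ^ l.length + pvHornerRec l := by
  rw [List.foldl_reverse]
  induction l with
  | nil => simp [pvHornerRec]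
  | cons v t ih =>
      simp only [List.foldr_cons, ih, pvHornerRec, List.length_cons, pow_succ]
      ring


theorem hornerRec_append (a b : List Int) :
    pvHornerRec (a ++ b) = pvHornerRec a + 6 ^ a.length * pvHornerRec b := by
  induction a with
  | nil => simp [pvHornerRec]
  | cons v t ih =>
      simp only [List.cons_append, pvHornerRec, ih, List.length_cons, pow_succ]
      ring

theorem a_row (l : List Int) (m h : Int) :
    l.foldl (fun (s : Int × Int) val => (s.1 * 6, s.2 + val * s.1)) (m, h)
      = (m * 6 ^ l.length, h + m * pvHornerRec l) := by
  induction l generalizing m h with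
  | nil => simp [pvHornerRec]
  | cons v t ih =>
      rw [List.foldl_cons, ih]
      simp only [pvHornerRec, List.length_cons, Prod.mk.injEq, pow_succ]
      constructor <;> ring

theorem a_board (rows : List (List Int)) (m h : Int) :
    (rows.foldl
      (fun s row => row.foldl (fun (s : Int × Int) val => (s.1 * 6, s.2 + val * s.1)) s)
      (m, h)).2 = h + m * pvHornerRec (rows.flatMap (fun row => row)) := by
  induction rows generalizing m h with
  | nil => simp [pvHornerRec]
  | cons r rs ih =>
      rw [List.foldl_cons, a_row, ih, List.flatMap_cons, hornerRec_append]
      ring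

-- ===== VERDICT (by name: the statement is the Claim_ definition above) =====
theorem board_to_hash_py_spec : Claim_equal_board_to_hash_py := by
  intro board _
  unfold Spec_board_to_hash_py board_to_hash_py board_to_hash_py_alt
  rw [a_board, b_fold]
  ring
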